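-- pv_equiv track=rewrite | github.com/etymology/dune-monorepo | src/dune_winder/generate_plc_monoroutine.py | _build_program_tag_maps
-- ===== SOURCE A (Python) =====
-- from collections import defaultdict
--
-- PROGRAM_PREFIXES = {
--   "Safety": "SF",
--   "MainProgram": "MP",
--   "PID_Tension_Servo": "PTS",
--   "Initialize": "INIT",
--   "Ready_State_1": "RS1",
--   "MoveXY_State_2_3": "MXY",
--   "MoveZ_State_4_5": "MZ",
--   "Latch_UnLatch_State_6_7_8": "LAT",
--   "UnServo_9": "US9",
--   "Error_State_10": "ERR10",
--   "EOT_Trip_11": "EOT11",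
--   "xz_move": "XZ",
--   "yz_move": "YZ",
--   "HMI_Stop_Request_14": "HMI14",
--   "motionQueue": "MQ",
-- }
--
-- def _collect_collision_names(program_payloads: dict[str, dict]) -> set[str]:
--   name_to_programs: dict[str, set[str]] = defaultdict(set)
--   for program_name, payload in program_payloads.items():
--     for tag in payload.get("program_tags", []):
--       name_to_programs[str(tag["name"])].add(program_name)
--   return {
--     name
--     for name, programs in name_to_programs.items()
--     if len(programs) > 1
--   }
--
-- def _build_program_tag_maps(program_payloads: dict[str, dict]) -> tuple[dict[str, dict[str, str]], dict[str, dict[str, str]]]: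
--   collisions = _collect_collision_names(program_payloads)
--   rename_maps: dict[str, dict[str, str]] = {}
--   rename_only: dict[str, dict[str, str]] = {}
--
--   for program_name, payload in program_payloads.items():
--     prefix = PROGRAM_PREFIXES[program_name]
--     program_map: dict[str, str] = {}
--     renamed_only_map: dict[str, str] = {}
--     for tag in payload.get("program_tags", []):
--       name = str(tag["name"])
--       new_name = f"{prefix}_{name}" if name in collisions else name
--       program_map[name] = new_name
--       if new_name != name:
--         renamed_only_map[name] = new_name
--     rename_maps[program_name] = program_map
--     rename_only[program_name] = renamed_only_map
--   return rename_maps, rename_only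
-- ===== SOURCE B (Python) =====
-- PROGRAM_PREFIXES = {
--   "Safety": "SF",
--   "MainProgram": "MP",
--   "PID_Tension_Servo": "PTS",
--   "Initialize": "INIT",
--   "Ready_State_1": "RS1",
--   "MoveXY_State_2_3": "MXY",
--   "MoveZ_State_4_5": "MZ",
--   "Latch_UnLatch_State_6_7_8": "LAT",
--   "UnServo_9": "US9",
--   "Error_State_10": "ERR10",
--   "EOT_Trip_11": "EOT11",
--   "xz_move": "XZ",
--   "yz_move": "YZ",
--   "HMI_Stop_Request_14": "HMI14",
--   "motionQueue": "MQ",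
-- }
--
-- def _build_program_tag_maps(program_payloads):
--   # No reverse index and no collision set at all: extract each program's raw
--   # tag-name list once, then decide each name's fate by a direct brute-force
--   # membership scan over the OTHER programs' name lists.
--   names_list = [
--     (pn, [str(t["name"]) for t in payload.get("program_tags", [])])
--     for pn, payload in program_payloads.items()
--   ]
--   rename_maps = {}
--   rename_only = {}
--   for program_name, names in names_list:
--     prefix = PROGRAM_PREFIXES[program_name]
--     full = {}
--     only = {}
--     for n in names:
--       if any(qn != program_name and n in qnames for qn, qnames in names_list):
--         full[n] = only[n] = f"{prefix}_{n}"
--       else: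
--         full[n] = n
--     rename_maps[program_name] = full
--     rename_only[program_name] = only
--   return rename_maps, rename_only
-- ===== Notes on version B (the rewrite author's own statement) =====
-- stated objective: alternative
-- what changed: A builds a reverse index name->set-of-programs, extracts a collision set from it, and then rescans every program's tags looking names up in that set; B builds no index and no collision set: it extracts each program's raw tag-name list once and decides each tag by a direct brute-force any() scan over the other programs' name lists.
import Mathlib
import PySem

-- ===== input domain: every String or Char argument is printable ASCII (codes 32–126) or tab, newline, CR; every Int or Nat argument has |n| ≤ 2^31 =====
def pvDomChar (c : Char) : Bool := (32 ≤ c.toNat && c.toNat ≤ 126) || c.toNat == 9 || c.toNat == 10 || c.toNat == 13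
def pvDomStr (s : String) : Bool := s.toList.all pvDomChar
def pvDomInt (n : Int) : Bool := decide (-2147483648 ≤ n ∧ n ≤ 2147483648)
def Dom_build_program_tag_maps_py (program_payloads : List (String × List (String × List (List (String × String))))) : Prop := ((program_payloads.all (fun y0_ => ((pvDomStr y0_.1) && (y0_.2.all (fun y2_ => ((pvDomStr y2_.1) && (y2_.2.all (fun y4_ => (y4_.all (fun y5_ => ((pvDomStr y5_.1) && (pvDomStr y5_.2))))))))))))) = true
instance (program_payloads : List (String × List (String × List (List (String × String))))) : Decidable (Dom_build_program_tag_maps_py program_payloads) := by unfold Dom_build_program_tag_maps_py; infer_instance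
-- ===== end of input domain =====

-- B builds no reverse index and no collision set: it extracts each program's raw tag-name list once
-- and decides each tag by a direct brute-force any-scan over the other programs' name lists
-- (objective: alternative — direct search instead of A's index/collision-set construction; not faster).


-- shared module constant PROGRAM_PREFIXES
def pvPrefixes : PySem.Dict String String := PySem.Dict.mk [
  ("Safety", "SF"), ("MainProgram", "MP"), ("PID_Tension_Servo", "PTS"), ("Initialize", "INIT"),
  ("Ready_State_1", "RS1"), ("MoveXY_State_2_3", "MXY"), ("MoveZ_State_4_5", "MZ"),
  ("Latch_UnLatch_State_6_7_8", "LAT"), ("UnServo_9", "US9"), ("Error_State_10", "ERR10"),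
  ("EOT_Trip_11", "EOT11"), ("xz_move", "XZ"), ("yz_move", "YZ"),
  ("HMI_Stop_Request_14", "HMI14"), ("motionQueue", "MQ")]

-- str(tag["name"]): tag values are strings, so str() is the identity; a missing "name" key is a
-- KeyError, excluded by Pre_ (the default "" is never read inside Pre_)
def pvTagName (tag : List (String × String)) : String := (PySem.Dict.mk tag).getD "name" ""

-- payload.get("program_tags", [])
def pvProgramTags (payload : List (String × List (List (String × String)))) : List (List (String × String)) :=
  (PySem.Dict.mk payload).getD "program_tags" []

-- ===== PORT A =====
-- helper _collect_collision_names: defaultdict(set) loop, then a set comprehension over the items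
def pvCollectCollisionNames (program_payloads : List (String × List (String × List (List (String × String))))) : PySem.Set String :=
  let name_to_programs : PySem.Dict String (PySem.Set String) :=
    program_payloads.foldl (fun d p =>
      (pvProgramTags p.2).foldl
        (fun d tag => d.modify (pvTagName tag) PySem.Set.empty (fun s => PySem.Set.add s p.1)) d)
      PySem.Dict.empty
  PySem.Set.ofList ((name_to_programs.items.filter (fun q => 1 < PySem.Set.len q.2)).map (·.1))

def build_program_tag_maps_py (program_payloads : List (String × List (String × List (List (String × String))))) : (List (String × List (String × String))) × (List (String × List (String × String))) :=
  let collisions := pvCollectCollisionNames program_payloads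
  let res := program_payloads.foldl
    (fun (acc : PySem.Dict String (List (String × String)) × PySem.Dict String (List (String × String))) p =>
      -- PROGRAM_PREFIXES[program_name]: KeyError for an unknown program, excluded by Pre_
      let pfx := pvPrefixes.getD p.1 ""
      let inner := (pvProgramTags p.2).foldl
        (fun (m : PySem.Dict String String × PySem.Dict String String) tag =>
          let name := pvTagName tag
          let new_name := if PySem.Set.contains collisions name then pfx ++ "_" ++ name else name
          (m.1.insert name new_name,
           if new_name ≠ name then m.2.insert name new_name else m.2))
        (PySem.Dict.empty, PySem.Dict.empty)
      (acc.1.insert p.1 inner.1.items, acc.2.insert p.1 inner.2.items))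
    (PySem.Dict.empty, PySem.Dict.empty)
  (res.1.items, res.2.items)

-- ===== PORT B =====
-- the tag names of one payload, in raw (possibly duplicated) order: [str(t["name"]) for t in …]
def pvNames (payload : List (String × List (List (String × String)))) : List String :=
  (pvProgramTags payload).map pvTagName

def build_program_tag_maps_py_alt (program_payloads : List (String × List (String × List (List (String × String))))) : (List (String × List (String × String))) × (List (String × List (String × String))) :=
  -- names_list = [(pn, [str(t["name"]) for t in payload.get("program_tags", [])]) …]
  let names_list : List (String × List String) := program_payloads.map (fun p => (p.1, pvNames p.2))
  let res := names_list.foldl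
    (fun (acc : PySem.Dict String (List (String × String)) × PySem.Dict String (List (String × String))) p =>
      let pfx := pvPrefixes.getD p.1 ""
      let inner := p.2.foldl
        (fun (m : PySem.Dict String String × PySem.Dict String String) n =>
          -- any(qn != program_name and n in qnames for qn, qnames in names_list)
          if names_list.any (fun q => decide (q.1 ≠ p.1) && decide (n ∈ q.2)) = true then
            (m.1.insert n (pfx ++ "_" ++ n), m.2.insert n (pfx ++ "_" ++ n))
          else
            (m.1.insert n n, m.2))
        (PySem.Dict.empty, PySem.Dict.empty)
      (acc.1.insert p.1 inner.1.items, acc.2.insert p.1 inner.2.items))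
    (PySem.Dict.empty, PySem.Dict.empty)
  (res.1.items, res.2.items)

-- ===== PRECONDITION & SPEC =====
-- Pre_ excludes (a) inputs where A raises a KeyError (a program name missing from PROGRAM_PREFIXES,
-- or a tag without a "name" key), and (b) association lists with duplicate keys at any dict level,
-- which cannot arise from the Python dict arguments this function receives.
def Pre_build_program_tag_maps_py (program_payloads : List (String × List (String × List (List (String × String))))) : Prop :=
  (program_payloads.map (·.1)).Nodup ∧
  ∀ p ∈ program_payloads, p.1 ∈ pvPrefixes.keys ∧ (p.2.map (·.1)).Nodup ∧
    ∀ tag ∈ pvProgramTags p.2, (tag.map (·.1)).Nodup ∧ "name" ∈ tag.map (·.1)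
instance (program_payloads : List (String × List (String × List (List (String × String))))) : Decidable (Pre_build_program_tag_maps_py program_payloads) := by unfold Pre_build_program_tag_maps_py; infer_instance

def pvWitness_build_program_tag_maps_py : (List (String × List (String × List (List (String × String))))) :=
  [("Safety", [("program_tags", [[("name", "alarm")]])]),
   ("MainProgram", [("program_tags", [[("name", "alarm")], [("name", "speed")]])])]

def Spec_build_program_tag_maps_py (program_payloads : List (String × List (String × List (List (String × String))))) (out : (List (String × List (String × String))) × (List (String × List (String × String)))) : Prop := out = build_program_tag_maps_py_alt program_payloads
instance (program_payloads : List (String × List (String × List (List (String × String))))) (out : (List (String × List (String × String))) × (List (String × List (String × String)))) : Decidable (Spec_build_program_tag_maps_py program_payloads out) := by unfold Spec_build_program_tag_maps_py; infer_instance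

-- ===== CLAIM (what is proved, stated in full; the proofs are below) =====
def Claim_equal_build_program_tag_maps_py : Prop := ∀ (program_payloads : List (String × List (String × List (List (String × String))))), Dom_build_program_tag_maps_py program_payloads → Pre_build_program_tag_maps_py program_payloads → Spec_build_program_tag_maps_py program_payloads (build_program_tag_maps_py program_payloads)

-- ===== LEMMAS AND PROOFS =====

-- how many payloads of pp use name n
def pvUses (pp : List (String × List (String × List (List (String × String))))) (n : String) : Nat :=
  (pp.filter (fun p => decide (n ∈ pvNames p.2))).length

theorem pv_add_of_not_mem {s : PySem.Set String} {x : String} (h : x ∉ s) :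
    PySem.Set.add s x = s ++ [x] := by
  simp [PySem.Set.add, h]

theorem pv_ofList_of_nodup {l : List String} (h : l.Nodup) : PySem.Set.update [] l = l := by
  have key : ∀ (l s : List String), l.Nodup → (∀ x ∈ l, x ∉ s) → PySem.Set.update s l = s ++ l := by
    intro l
    induction l with
    | nil => intro s _ _; simp [PySem.Set.update]
    | cons x t ih =>
      intro s hnd hd
      have hx : x ∉ s := hd x (by simp)
      have step : PySem.Set.update s (x :: t) = PySem.Set.update (PySem.Set.add s x) t := rfl
      rw [step, pv_add_of_not_mem hx, ih (s ++ [x]) (List.nodup_cons.mp hnd).2 ?_]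
      · simp
      · intro y hy
        simp only [List.mem_append, List.mem_singleton, not_or]
        exact ⟨hd y (by simp [hy]), fun e => (List.nodup_cons.mp hnd).1 (e ▸ hy)⟩
  simpa using key l [] h (by simp)

theorem pv_mem_update_nil {l : List String} {x : String} : x ∈ PySem.Set.update [] l ↔ x ∈ l := by
  have : PySem.Set.update [] l = PySem.Set.ofList l := rfl
  rw [this, PySem.Set.mem_ofList]

theorem pv_update_nodup_single (s : List String) (m : String) (hs : s.Nodup) (h : m ∉ s) :
    (s ++ [m]).Nodup := by
  refine List.Nodup.append hs (List.nodup_singleton m) ?_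
  simpa [List.disjoint_singleton] using h

-- name_to_programs: effect of one payload's tag loop on one bucket
theorem pv_ntp_inner (p1 : String) (tags : List (List (String × String)))
    (d : PySem.Dict String (PySem.Set String)) (n : String) :
    ((tags.foldl (fun d tag => d.modify (pvTagName tag) PySem.Set.empty (fun s => PySem.Set.add s p1)) d).getD n PySem.Set.empty)
      = if n ∈ tags.map pvTagName then PySem.Set.add (d.getD n PySem.Set.empty) p1 else d.getD n PySem.Set.empty := by
  induction tags generalizing d with
  | nil => simp
  | cons t ts ih =>
    simp only [List.foldl_cons, List.map_cons, List.mem_cons]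
    rw [ih, PySem.Dict.getD_modify]
    by_cases h1 : n = pvTagName t
    · simp [h1]
    · by_cases h2 : n ∈ ts.map pvTagName <;> simp [h1, h2]

-- name_to_programs: one bucket after the whole loop
theorem pv_ntp_outer (pp : List (String × List (String × List (List (String × String)))))
    (d : PySem.Dict String (PySem.Set String)) (n : String) :
    ((pp.foldl (fun d p => (pvProgramTags p.2).foldl (fun d tag => d.modify (pvTagName tag) PySem.Set.empty (fun s => PySem.Set.add s p.1)) d) d).getD n PySem.Set.empty)
      = PySem.Set.update (d.getD n PySem.Set.empty) ((pp.filter (fun p => decide (n ∈ pvNames p.2))).map (·.1)) := by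
  induction pp generalizing d with
  | nil => simp [PySem.Set.update]
  | cons p ps ih =>
    simp only [List.foldl_cons, List.filter_cons]
    rw [ih, pv_ntp_inner]
    by_cases h : n ∈ pvNames p.2
    · have h' : n ∈ (pvProgramTags p.2).map pvTagName := h
      simp only [h', if_pos, h, decide_true, List.map_cons]
      rfl
    · have h' : n ∉ (pvProgramTags p.2).map pvTagName := h
      simp [h', h]

theorem pv_ntp_nodup_keys (pp : List (String × List (String × List (List (String × String)))))
    (d : PySem.Dict String (PySem.Set String)) (h : d.keys.Nodup) :
    (pp.foldl (fun d p => (pvProgramTags p.2).foldl (fun d tag => d.modify (pvTagName tag) PySem.Set.empty (fun s => PySem.Set.add s p.1)) d) d).keys.Nodup := by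
  induction pp generalizing d with
  | nil => simpa
  | cons p ps ih =>
    simp only [List.foldl_cons]
    exact ih _ (PySem.Dict.nodup_keys_foldl_modify_key _ pvTagName _ (fun _ _ => fun s => PySem.Set.add s p.1) d h)

-- the collision test is exactly "more than one distinct program uses n"
theorem pv_collisions_contains (pp : List (String × List (String × List (List (String × String)))))
    (hnd : (pp.map (·.1)).Nodup) (n : String) :
    PySem.Set.contains (pvCollectCollisionNames pp) n = decide (1 < pvUses pp n) := by
  have hlen : ∀ m : String,
      PySem.Set.len ((pp.foldl (fun d p => (pvProgramTags p.2).foldl (fun d tag => d.modify (pvTagName tag) PySem.Set.empty (fun s => PySem.Set.add s p.1)) d) PySem.Dict.empty).getD m PySem.Set.empty)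
        = (pvUses pp m : Int) := by
    intro m
    rw [pv_ntp_outer]
    have hemp : (PySem.Dict.empty : PySem.Dict String (PySem.Set String)).getD m PySem.Set.empty = PySem.Set.empty := rfl
    rw [hemp]
    have hsub : ((pp.filter (fun p => decide (m ∈ pvNames p.2))).map (·.1)).Sublist (pp.map (·.1)) :=
      List.Sublist.map _ List.filter_sublist
    have hnd2 : ((pp.filter (fun p => decide (m ∈ pvNames p.2))).map (·.1)).Nodup := hnd.sublist hsub
    have he : (PySem.Set.empty : PySem.Set String) = ([] : List String) := rfl
    rw [he, pv_ofList_of_nodup hnd2]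
    simp [PySem.Set.len, pvUses]
  have hkeys : (pp.foldl (fun d p => (pvProgramTags p.2).foldl (fun d tag => d.modify (pvTagName tag) PySem.Set.empty (fun s => PySem.Set.add s p.1)) d) PySem.Dict.empty).keys.Nodup :=
    pv_ntp_nodup_keys pp PySem.Dict.empty (by simp)
  have hc : ∀ (s : PySem.Set String) (x : String), PySem.Set.contains s x = decide (x ∈ s) := by
    intro s x; by_cases h : x ∈ s <;> simp [PySem.Set.contains, h]
  simp only [pvCollectCollisionNames]
  rw [hc, decide_eq_decide, PySem.Set.mem_ofList]
  constructor
  · intro hmem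
    obtain ⟨q, hq, hq1⟩ := List.mem_map.mp hmem
    obtain ⟨hqi, hql⟩ := List.mem_filter.mp hq
    have hgd := PySem.Dict.getD_of_mem_items _ (by exact hqi) hkeys PySem.Set.empty
    have := hlen q.1
    rw [hgd] at this
    have hq2 : 1 < PySem.Set.len q.2 := by simpa using hql
    rw [this] at hq2
    rw [← hq1]
    exact_mod_cast hq2
  · intro h1
    have hlenn := hlen n
    have hkn : n ∈ (pp.foldl (fun d p => (pvProgramTags p.2).foldl (fun d tag => d.modify (pvTagName tag) PySem.Set.empty (fun s => PySem.Set.add s p.1)) d) PySem.Dict.empty).keys := by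
      by_contra hnk
      have hcf := PySem.Dict.getD_of_not_contains (d := (pp.foldl (fun d p => (pvProgramTags p.2).foldl (fun d tag => d.modify (pvTagName tag) PySem.Set.empty (fun s => PySem.Set.add s p.1)) d) PySem.Dict.empty)) (k := n) PySem.Set.empty (by
        rw [← Bool.not_eq_true, PySem.Dict.contains_iff_mem_keys]; exact hnk)
      rw [hcf] at hlenn
      have : PySem.Set.len (PySem.Set.empty : PySem.Set String) = 0 := rfl
      rw [this] at hlenn
      omega
    simp only [PySem.Dict.keys] at hkn
    obtain ⟨q, hqi, hq1⟩ := List.mem_map.mp hkn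
    refine List.mem_map.mpr ⟨q, List.mem_filter.mpr ⟨hqi, ?_⟩, hq1⟩
    have hgd := PySem.Dict.getD_of_mem_items _ (show (q.1, q.2) ∈ _ from hqi) hkeys PySem.Set.empty
    have := hlen q.1
    rw [hgd] at this
    simp only [hq1] at this
    simp only [decide_eq_true_eq]
    rw [this]
    exact_mod_cast h1

-- a list with two distinct members has more than one element
theorem pv_one_lt_length {α : Type} {l : List α} {a b : α} (ha : a ∈ l) (hb : b ∈ l) (hab : a ≠ b) :
    1 < l.length := by
  cases l with
  | nil => cases ha
  | cons x t =>
    cases t with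
    | nil =>
      simp only [List.mem_singleton] at ha hb
      exact absurd (ha.trans hb.symm) hab
    | cons y u => simp only [List.length_cons]; omega

-- B's brute-force any-scan agrees with "more than one distinct program uses n",
-- for a name n that program p itself uses (program names distinct)
theorem pv_bruteforce (pp : List (String × List (String × List (List (String × String)))))
    (hnd : (pp.map (·.1)).Nodup) (p : String × List (String × List (List (String × String))))
    (hp : p ∈ pp) (n : String) (hn : n ∈ pvNames p.2) :
    (pp.any (fun q => decide (q.1 ≠ p.1) && decide (n ∈ pvNames q.2))) = decide (1 < pvUses pp n) := by
  have hndF : ((pp.filter (fun q => decide (n ∈ pvNames q.2))).map (·.1)).Nodup :=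
    hnd.sublist (List.Sublist.map _ List.filter_sublist)
  rw [Bool.eq_iff_iff]
  simp only [List.any_eq_true, Bool.and_eq_true, decide_eq_true_eq, pvUses]
  constructor
  · rintro ⟨q, hq, hq1, hq2⟩
    have hpF : p ∈ pp.filter (fun q => decide (n ∈ pvNames q.2)) :=
      List.mem_filter.mpr ⟨hp, by simpa using hn⟩
    have hqF : q ∈ pp.filter (fun q => decide (n ∈ pvNames q.2)) :=
      List.mem_filter.mpr ⟨hq, by simpa using hq2⟩
    exact pv_one_lt_length hqF hpF (fun e => hq1 (congrArg (·.1) e))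
  · intro h1
    cases hF : pp.filter (fun q => decide (n ∈ pvNames q.2)) with
    | nil => rw [hF] at h1; simp at h1
    | cons a t =>
      cases t with
      | nil => rw [hF] at h1; simp at h1
      | cons b u =>
        have haF : a ∈ pp.filter (fun q => decide (n ∈ pvNames q.2)) := by rw [hF]; simp
        have hbF : b ∈ pp.filter (fun q => decide (n ∈ pvNames q.2)) := by rw [hF]; simp
        have hab : a.1 ≠ b.1 := by
          have := hndF
          rw [hF] at this
          simp only [List.map_cons, List.nodup_cons, List.mem_cons, List.mem_map] at this
          exact fun e => this.1 (Or.inl e)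
        rcases eq_or_ne a.1 p.1 with he | he
        · exact ⟨b, (List.mem_filter.mp hbF).1, fun e => hab (he.trans e.symm),
            by simpa using (List.mem_filter.mp hbF).2⟩
        · exact ⟨a, (List.mem_filter.mp haF).1, he, by simpa using (List.mem_filter.mp haF).2⟩

-- unconditional insert loop over names, value a function of the key only
theorem pv_items_foldl_insert (f : String → String) (names : List String) :
    ∀ (s : List String) (d : PySem.Dict String String), s.Nodup →
    d.items = s.map (fun n => (n, f n)) →
    (names.foldl (fun d n => d.insert n (f n)) d).items
      = (PySem.Set.update s names).map (fun n => (n, f n)) := by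
  induction names with
  | nil => intro s d _ h; simpa [PySem.Set.update] using h
  | cons m ms ih =>
    intro s d hs hd
    simp only [List.foldl_cons]
    have hkeys : d.keys = s := by
      have hcomp : ((fun x : String × String => x.1) ∘ fun n => (n, f n)) = id := rfl
      simp [PySem.Dict.keys, hd, hcomp]
    have step : PySem.Set.update s (m :: ms) = PySem.Set.update (PySem.Set.add s m) ms := rfl
    rw [step]
    by_cases h : m ∈ s
    · rw [PySem.Set.add_of_mem h]
      refine ih s (d.insert m (f m)) hs ?_
      rw [PySem.Dict.items_insert_of_contains d (f m)
        ((PySem.Dict.contains_iff_mem_keys d m).mpr (hkeys ▸ h))]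
      rw [hd, List.map_map]
      refine List.map_congr_left ?_
      intro n _
      by_cases hn : n = m
      · simp [hn]
      · simp [hn]
    · rw [pv_add_of_not_mem h]
      refine ih (s ++ [m]) (d.insert m (f m)) ?_ ?_
      · exact pv_update_nodup_single s m hs h
      · rw [PySem.Dict.items_insert_of_not_contains d (f m)
          (by rw [← Bool.not_eq_true, PySem.Dict.contains_iff_mem_keys, hkeys]; exact h)]
        rw [hd, List.map_append]
        rfl

-- conditional insert loop over names (arbitrary Bool predicate P)
theorem pv_items_foldl_insertP (f : String → String) (P : String → Bool) (names : List String) :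
    ∀ (s : List String) (d : PySem.Dict String String), s.Nodup →
    d.items = (s.filter P).map (fun n => (n, f n)) →
    (names.foldl (fun d n => if P n = true then d.insert n (f n) else d) d).items
      = ((PySem.Set.update s names).filter P).map (fun n => (n, f n)) := by
  induction names with
  | nil => intro s d _ h; simpa [PySem.Set.update] using h
  | cons m ms ih =>
    intro s d hs hd
    simp only [List.foldl_cons]
    have hkeys : d.keys = s.filter P := by
      have hcomp : ((fun x : String × String => x.1) ∘ fun n => (n, f n)) = id := rfl
      simp [PySem.Dict.keys, hd, hcomp]
    have step : PySem.Set.update s (m :: ms) = PySem.Set.update (PySem.Set.add s m) ms := rfl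
    rw [step]
    by_cases hP : P m = true
    · rw [if_pos hP]
      by_cases h : m ∈ s
      · rw [PySem.Set.add_of_mem h]
        refine ih s (d.insert m (f m)) hs ?_
        have hmf : m ∈ s.filter P := List.mem_filter.mpr ⟨h, hP⟩
        rw [PySem.Dict.items_insert_of_contains d (f m)
          ((PySem.Dict.contains_iff_mem_keys d m).mpr (hkeys ▸ hmf))]
        rw [hd, List.map_map]
        refine List.map_congr_left ?_
        intro n _
        by_cases hn : n = m
        · simp [hn]
        · simp [hn]
      · rw [pv_add_of_not_mem h]
        refine ih (s ++ [m]) (d.insert m (f m)) (pv_update_nodup_single s m hs h) ?_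
        rw [PySem.Dict.items_insert_of_not_contains d (f m)
          (by rw [← Bool.not_eq_true, PySem.Dict.contains_iff_mem_keys, hkeys]
              exact fun hc => h (List.mem_filter.mp hc).1)]
        rw [hd, List.filter_append, List.map_append]
        simp [hP]
    · rw [if_neg hP]
      by_cases h : m ∈ s
      · rw [PySem.Set.add_of_mem h]
        exact ih s d hs hd
      · rw [pv_add_of_not_mem h]
        refine ih (s ++ [m]) d (pv_update_nodup_single s m hs h) ?_
        rw [hd, List.filter_append]
        simp [hP]

-- the two outer dicts: a fold of inserts over distinct fresh keys lists its items in order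
theorem pv_pair_items {T : Type} (key : T → String) (v1 v2 : T → List (String × String)) (pp : List T)
    (hnd : (pp.map key).Nodup) :
    ((pp.foldl (fun (acc : PySem.Dict String (List (String × String)) × PySem.Dict String (List (String × String))) p =>
        (acc.1.insert (key p) (v1 p), acc.2.insert (key p) (v2 p))) (PySem.Dict.empty, PySem.Dict.empty)).1.items
      = pp.map (fun p => (key p, v1 p)))
    ∧ ((pp.foldl (fun (acc : PySem.Dict String (List (String × String)) × PySem.Dict String (List (String × String))) p =>
        (acc.1.insert (key p) (v1 p), acc.2.insert (key p) (v2 p))) (PySem.Dict.empty, PySem.Dict.empty)).2.items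
      = pp.map (fun p => (key p, v2 p))) := by
  rw [PySem.List.foldl_prod_mk (fun (d : PySem.Dict String (List (String × String))) p => d.insert (key p) (v1 p))
      (fun (d : PySem.Dict String (List (String × String))) p => d.insert (key p) (v2 p)) pp
      PySem.Dict.empty PySem.Dict.empty]
  constructor
  · rw [PySem.Dict.items_foldl_insert_fresh pp key v1 PySem.Dict.empty (fun a _ => by simp) hnd]
    rfl
  · rw [PySem.Dict.items_foldl_insert_fresh pp key v2 PySem.Dict.empty (fun a _ => by simp) hnd]
    rfl

-- A's per-program tag loop, first dict
theorem pv_A_inner_fst (coll : PySem.Set String) (pfx : String) (tags : List (List (String × String))) :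
    (tags.foldl (fun (m : PySem.Dict String String × PySem.Dict String String) tag =>
        (m.1.insert (pvTagName tag) (if coll.contains (pvTagName tag) = true then pfx ++ "_" ++ pvTagName tag else pvTagName tag),
         if (if coll.contains (pvTagName tag) = true then pfx ++ "_" ++ pvTagName tag else pvTagName tag) ≠ pvTagName tag then
           m.2.insert (pvTagName tag) (if coll.contains (pvTagName tag) = true then pfx ++ "_" ++ pvTagName tag else pvTagName tag)
         else m.2)) (PySem.Dict.empty, PySem.Dict.empty)).1.items
      = (PySem.Set.update [] (tags.map pvTagName)).map
          (fun n => (n, if coll.contains n = true then pfx ++ "_" ++ n else n)) := by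
  rw [PySem.List.foldl_prod_mk
      (fun (d : PySem.Dict String String) tag => d.insert (pvTagName tag) (if coll.contains (pvTagName tag) = true then pfx ++ "_" ++ pvTagName tag else pvTagName tag))
      (fun (d : PySem.Dict String String) tag => if (if coll.contains (pvTagName tag) = true then pfx ++ "_" ++ pvTagName tag else pvTagName tag) ≠ pvTagName tag then d.insert (pvTagName tag) (if coll.contains (pvTagName tag) = true then pfx ++ "_" ++ pvTagName tag else pvTagName tag) else d)
      tags PySem.Dict.empty PySem.Dict.empty]
  refine Eq.trans ?_ (pv_items_foldl_insert
    (fun n => if coll.contains n = true then pfx ++ "_" ++ n else n)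
    (tags.map pvTagName) [] PySem.Dict.empty (by simp) rfl)
  simp [List.foldl_map]

-- A's per-program tag loop, renamed-only dict
theorem pv_A_inner_snd (coll : PySem.Set String) (pfx : String) (tags : List (List (String × String))) :
    (tags.foldl (fun (m : PySem.Dict String String × PySem.Dict String String) tag =>
        (m.1.insert (pvTagName tag) (if coll.contains (pvTagName tag) = true then pfx ++ "_" ++ pvTagName tag else pvTagName tag),
         if (if coll.contains (pvTagName tag) = true then pfx ++ "_" ++ pvTagName tag else pvTagName tag) ≠ pvTagName tag then
           m.2.insert (pvTagName tag) (if coll.contains (pvTagName tag) = true then pfx ++ "_" ++ pvTagName tag else pvTagName tag)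
         else m.2)) (PySem.Dict.empty, PySem.Dict.empty)).2.items
      = ((PySem.Set.update [] (tags.map pvTagName)).filter
          (fun n => decide ((if coll.contains n = true then pfx ++ "_" ++ n else n) ≠ n))).map
          (fun n => (n, if coll.contains n = true then pfx ++ "_" ++ n else n)) := by
  rw [PySem.List.foldl_prod_mk
      (fun (d : PySem.Dict String String) tag => d.insert (pvTagName tag) (if coll.contains (pvTagName tag) = true then pfx ++ "_" ++ pvTagName tag else pvTagName tag))
      (fun (d : PySem.Dict String String) tag => if (if coll.contains (pvTagName tag) = true then pfx ++ "_" ++ pvTagName tag else pvTagName tag) ≠ pvTagName tag then d.insert (pvTagName tag) (if coll.contains (pvTagName tag) = true then pfx ++ "_" ++ pvTagName tag else pvTagName tag) else d)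
      tags PySem.Dict.empty PySem.Dict.empty]
  refine Eq.trans ?_ (pv_items_foldl_insertP
    (fun n => if coll.contains n = true then pfx ++ "_" ++ n else n)
    (fun n => decide ((if coll.contains n = true then pfx ++ "_" ++ n else n) ≠ n))
    (tags.map pvTagName) [] PySem.Dict.empty (by simp) rfl)
  simp [List.foldl_map]

-- B's per-program name loop: split the paired conditional fold into its two components
theorem pv_B_inner_split (P : String → Bool) (pfx : String) (names : List String) :
    names.foldl (fun (m : PySem.Dict String String × PySem.Dict String String) n =>
        if P n = true then (m.1.insert n (pfx ++ "_" ++ n), m.2.insert n (pfx ++ "_" ++ n))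
        else (m.1.insert n n, m.2)) (PySem.Dict.empty, PySem.Dict.empty)
      = (names.foldl (fun (d : PySem.Dict String String) n => d.insert n (if P n = true then pfx ++ "_" ++ n else n)) PySem.Dict.empty,
         names.foldl (fun (d : PySem.Dict String String) n => if P n = true then d.insert n (pfx ++ "_" ++ n) else d) PySem.Dict.empty) := by
  rw [← PySem.List.foldl_prod_mk
      (fun (d : PySem.Dict String String) n => d.insert n (if P n = true then pfx ++ "_" ++ n else n))
      (fun (d : PySem.Dict String String) n => if P n = true then d.insert n (pfx ++ "_" ++ n) else d)
      names PySem.Dict.empty PySem.Dict.empty]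
  refine congrFun (congrFun (congrArg List.foldl ?_) _) _
  funext m n
  by_cases h : P n = true <;> simp [h]

-- ===== VERDICT (by name: the statement is the Claim_ definition above) =====
theorem build_program_tag_maps_py_spec : Claim_equal_build_program_tag_maps_py := by
  intro pp _ hpre
  obtain ⟨hnd, -⟩ := hpre
  unfold Spec_build_program_tag_maps_py
  simp only [build_program_tag_maps_py, build_program_tag_maps_py_alt]
  -- align B's outer fold (over names_list = pp.map …) with a fold over pp
  rw [List.foldl_map]
  -- the Bool test B uses for program p and name n, rewritten as a scan over pp
  have hany : ∀ (p : String × List (String × List (List (String × String)))) (n : String),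
      ((pp.map (fun p => (p.1, pvNames p.2))).any (fun q => decide (q.1 ≠ p.1) && decide (n ∈ q.2)))
        = (pp.any (fun q => decide (q.1 ≠ p.1) && decide (n ∈ pvNames q.2))) := by
    intro p n; rw [List.any_map]; rfl
  refine Prod.ext_iff.mpr ⟨?_, ?_⟩
  · rw [(pv_pair_items (fun p => p.1) _ _ pp hnd).1, (pv_pair_items (fun p => p.1) _ _ pp hnd).1]
    refine List.map_congr_left ?_
    intro p hp
    refine congrArg (Prod.mk p.1) ?_
    rw [pv_A_inner_fst, pv_B_inner_split]
    simp only []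
    rw [pv_items_foldl_insert
      (fun n => if ((pp.map (fun p => (p.1, pvNames p.2))).any (fun q => decide (q.1 ≠ p.1) && decide (n ∈ q.2))) = true then pvPrefixes.getD p.1 "" ++ "_" ++ n else n)
      (pvNames p.2) [] PySem.Dict.empty (by simp) rfl]
    refine List.map_congr_left ?_
    intro n hn
    have hn' : n ∈ pvNames p.2 := pv_mem_update_nil.mp hn
    refine congrArg (Prod.mk n) ?_
    rw [hany p n, pv_bruteforce pp hnd p hp n hn', pv_collisions_contains pp hnd n]
  · rw [(pv_pair_items (fun p => p.1) _ _ pp hnd).2, (pv_pair_items (fun p => p.1) _ _ pp hnd).2]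
    refine List.map_congr_left ?_
    intro p hp
    refine congrArg (Prod.mk p.1) ?_
    rw [pv_A_inner_snd, pv_B_inner_split]
    simp only []
    rw [pv_items_foldl_insertP
      (fun n => pvPrefixes.getD p.1 "" ++ "_" ++ n)
      (fun n => (pp.map (fun p => (p.1, pvNames p.2))).any (fun q => decide (q.1 ≠ p.1) && decide (n ∈ q.2)))
      (pvNames p.2) [] PySem.Dict.empty (by simp) rfl]
    have hfilter : ((PySem.Set.update [] ((pvProgramTags p.2).map pvTagName)).filter
          (fun n => decide ((if (pvCollectCollisionNames pp).contains n = true then pvPrefixes.getD p.1 "" ++ "_" ++ n else n) ≠ n)))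
        = ((PySem.Set.update [] (pvNames p.2)).filter
          (fun n => (pp.map (fun p => (p.1, pvNames p.2))).any (fun q => decide (q.1 ≠ p.1) && decide (n ∈ q.2)))) := by
      refine List.filter_congr ?_
      intro n hn
      have hn' : n ∈ pvNames p.2 := pv_mem_update_nil.mp hn
      rw [hany p n, pv_bruteforce pp hnd p hp n hn']
      rw [pv_collisions_contains pp hnd n]
      by_cases h : 1 < pvUses pp n
      · simp [h]
      · simp [h]
    rw [hfilter]
    refine List.map_congr_left ?_
    intro n hn
    have hcoll : ((pp.map (fun p => (p.1, pvNames p.2))).any (fun q => decide (q.1 ≠ p.1) && decide (n ∈ q.2))) = true :=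
      (List.mem_filter.mp hn).2
    have hmem : n ∈ pvNames p.2 := pv_mem_update_nil.mp (List.mem_filter.mp hn).1
    have hc : (pvCollectCollisionNames pp).contains n = true := by
      rw [pv_collisions_contains pp hnd n, ← pv_bruteforce pp hnd p hp n hmem, ← hany p n]
      exact hcoll
    rw [if_pos hc]
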